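-- pv_equiv track=rewrite | github.com/Nemesis-dev18/Cup_P | #taller ordenamiento con def.py | ordenar_fechas
-- ===== SOURCE A (Python) =====
-- def ordenar_fechas(dias, meses, años):
--     n = len(dias)
--     for i in range(n):
--         for j in range(0, n-i-1):#el rango es desde 0 hasta n-i-1 porque en cada pasada el último elemento ya está en su lugar correcto n es la longitud de la lista y i es el número de pasada actual y -1 es para evitar un índice fuera de rango
--             if (años[j], meses[j], dias[j]) > (años[j+1], meses[j+1], dias[j+1]):
--                 años[j], años[j+1] = años[j+1], años[j]
--                 meses[j], meses[j+1] = meses[j+1], meses[j]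
--                 dias[j], dias[j+1] = dias[j+1], dias[j]
--     return dias, meses, años
-- ===== SOURCE B (Python) =====
-- def ordenar_fechas(dias, meses, años):
--     n = len(dias)
--     if n > 1:
--         # three stable single-key sorts = one lexicographic (año, mes, día) sort
--         ts = [(años[i], meses[i], dias[i]) for i in range(n)]
--         ts = sorted(ts, key=lambda t: t[2])
--         ts = sorted(ts, key=lambda t: t[1])
--         ts = sorted(ts, key=lambda t: t[0])
--         años[:n] = [t[0] for t in ts]
--         meses[:n] = [t[1] for t in ts]
--         dias[:] = [t[2] for t in ts]
--     return dias, meses, años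
-- ===== Notes on version B (the rewrite author's own statement) =====
-- stated objective: faster
-- what changed: Replaces the quadratic in-place bubble sort over three parallel lists with one pass that zips the first len(dias) entries into (año, mes, día) triples, sorts them with three stable builtin single-key sorts (radix-style, equivalent to one lexicographic sort), and slice-assigns the results back into the same list objects.
import Mathlib
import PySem

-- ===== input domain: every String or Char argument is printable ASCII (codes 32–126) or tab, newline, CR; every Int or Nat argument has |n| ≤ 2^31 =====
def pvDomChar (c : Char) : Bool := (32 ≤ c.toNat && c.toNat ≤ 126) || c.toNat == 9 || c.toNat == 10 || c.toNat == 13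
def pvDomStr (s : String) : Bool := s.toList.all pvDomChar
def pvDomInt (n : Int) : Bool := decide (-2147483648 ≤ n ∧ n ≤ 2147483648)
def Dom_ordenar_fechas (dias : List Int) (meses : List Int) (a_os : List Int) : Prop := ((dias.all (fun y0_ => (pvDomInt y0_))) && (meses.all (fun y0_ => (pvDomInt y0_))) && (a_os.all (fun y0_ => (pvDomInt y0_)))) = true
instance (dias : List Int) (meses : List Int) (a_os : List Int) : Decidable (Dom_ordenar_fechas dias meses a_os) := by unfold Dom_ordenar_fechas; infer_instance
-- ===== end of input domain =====

-- B replaces A's in-place bubble sort of three parallel lists by zipping the first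
-- len(dias) entries into (año, mes, día) triples, sorting them with three stable
-- single-key sorts (radix style = one lexicographic sort), and writing the columns back.
-- Both A and B mutate the argument lists in place in Python; the equivalence proved
-- here is about the returned value (which aliases those lists).

-- ===== PORT A =====
-- Python tuple comparison (años[j], meses[j], dias[j]) > (años[j+1], meses[j+1], dias[j+1])
def pvGt (x y : Int × Int × Int) : Bool :=
  decide (y.1 < x.1) || (x.1 == y.1 && (decide (y.2.1 < x.2.1) || (x.2.1 == y.2.1 && decide (y.2.2 < x.2.2))))

-- one body of A's inner loop: compare the date tuples at j and j+1 and swap all three lists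
def pvSwapStep (st : List Int × List Int × List Int) (j : Nat) : List Int × List Int × List Int :=
  let d := st.1; let m := st.2.1; let a := st.2.2
  if pvGt (a.getD j 0, m.getD j 0, d.getD j 0) (a.getD (j+1) 0, m.getD (j+1) 0, d.getD (j+1) 0) then
    ((d.set j (d.getD (j+1) 0)).set (j+1) (d.getD j 0),
     (m.set j (m.getD (j+1) 0)).set (j+1) (m.getD j 0),
     (a.set j (a.getD (j+1) 0)).set (j+1) (a.getD j 0))
  else st

def ordenar_fechas (dias : List Int) (meses : List Int) (a_os : List Int) : List Int × List Int × List Int :=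
  let n := dias.length
  (List.range n).foldl (fun st i => (List.range (n - i - 1)).foldl pvSwapStep st) (dias, meses, a_os)

-- ===== PORT B =====
def ordenar_fechas_alt (dias : List Int) (meses : List Int) (a_os : List Int) : List Int × List Int × List Int :=
  let n := dias.length
  if 1 < n then
    let ts0 := (List.range n).map (fun i => (a_os.getD i 0, meses.getD i 0, dias.getD i 0))
    let ts1 := PySem.List.sorted ts0 (fun t => t.2.2) false
    let ts2 := PySem.List.sorted ts1 (fun t => t.2.1) false
    let ts3 := PySem.List.sorted ts2 (fun t => t.1) false
    (ts3.map (fun t => t.2.2),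
     ts3.map (fun t => t.2.1) ++ meses.drop n,
     ts3.map (fun t => t.1) ++ a_os.drop n)
  else (dias, meses, a_os)

-- ===== PRECONDITION & SPEC =====
-- Pre_ excludes exactly the inputs where A raises IndexError: with at least two días,
-- meses or años shorter than dias makes años[j]/meses[j] go out of range.
def Pre_ordenar_fechas (dias : List Int) (meses : List Int) (a_os : List Int) : Prop :=
  dias.length ≤ 1 ∨ (dias.length ≤ meses.length ∧ dias.length ≤ a_os.length)
instance (dias : List Int) (meses : List Int) (a_os : List Int) : Decidable (Pre_ordenar_fechas dias meses a_os) := by unfold Pre_ordenar_fechas; infer_instance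

def pvWitness_ordenar_fechas : List Int × List Int × List Int := ([2, 1, 15], [5, 5, 1], [2020, 2020, 2019])

def Spec_ordenar_fechas (dias : List Int) (meses : List Int) (a_os : List Int) (out : List Int × List Int × List Int) : Prop := out = ordenar_fechas_alt dias meses a_os
instance (dias : List Int) (meses : List Int) (a_os : List Int) (out : List Int × List Int × List Int) : Decidable (Spec_ordenar_fechas dias meses a_os out) := by unfold Spec_ordenar_fechas; infer_instance

-- ===== CLAIM (what is proved, stated in full; the proofs are below) =====
def Claim_equal_ordenar_fechas : Prop := ∀ (dias : List Int) (meses : List Int) (a_os : List Int), Dom_ordenar_fechas dias meses a_os → Pre_ordenar_fechas dias meses a_os → Spec_ordenar_fechas dias meses a_os (ordenar_fechas dias meses a_os)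

-- ===== LEMMAS AND PROOFS =====

-- lexicographic ≤ on (año, mes, día)
def tle (x y : Int × Int × Int) : Prop :=
  x.1 < y.1 ∨ (x.1 = y.1 ∧ (x.2.1 < y.2.1 ∨ (x.2.1 = y.2.1 ∧ x.2.2 ≤ y.2.2)))

lemma tle_of_not_gt {x y : Int × Int × Int} (h : pvGt x y = false) : tle x y := by
  obtain ⟨a1, m1, d1⟩ := x; obtain ⟨a2, m2, d2⟩ := y
  simp [pvGt, tle] at *; omega

lemma tle_of_gt {x y : Int × Int × Int} (h : pvGt x y = true) : tle y x := by
  obtain ⟨a1, m1, d1⟩ := x; obtain ⟨a2, m2, d2⟩ := y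
  simp [pvGt, tle] at *; omega

lemma tle_refl (x : Int × Int × Int) : tle x x := by
  obtain ⟨a, m, d⟩ := x; simp [tle]

lemma tle_trans {x y z : Int × Int × Int} (h1 : tle x y) (h2 : tle y z) : tle x z := by
  obtain ⟨a1, m1, d1⟩ := x; obtain ⟨a2, m2, d2⟩ := y; obtain ⟨a3, m3, d3⟩ := z
  simp [tle] at *; omega

lemma tle_antisymm {x y : Int × Int × Int} (h1 : tle x y) (h2 : tle y x) : x = y := by
  obtain ⟨a1, m1, d1⟩ := x; obtain ⟨a2, m2, d2⟩ := y
  simp [tle] at *; omega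

-- adjacent-swap step on the list of triples (mirrors pvSwapStep)
def tSwap (L : List (Int × Int × Int)) (j : Nat) : List (Int × Int × Int) :=
  if pvGt (L.getD j (0,0,0)) (L.getD (j+1) (0,0,0)) then
    (L.set j (L.getD (j+1) (0,0,0))).set (j+1) (L.getD j (0,0,0))
  else L

-- structural bubble pass, k compare-swap steps from the front
def tpass : Nat → List (Int × Int × Int) → List (Int × Int × Int)
  | 0, L => L
  | _+1, [] => []
  | _+1, [x] => [x]
  | k+1, x :: y :: t => if pvGt x y then y :: tpass k (x :: t) else x :: tpass k (y :: t)

lemma tSwap_cons_succ (z : Int × Int × Int) (L : List (Int × Int × Int)) (j : Nat) :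
    tSwap (z :: L) (j+1) = z :: tSwap L j := by
  unfold tSwap; split <;> split <;> simp_all

lemma foldl_tSwap_shift (is : List Nat) (z : Int × Int × Int) (L : List (Int × Int × Int)) :
    (is.map (· + 1)).foldl tSwap (z :: L) = z :: is.foldl tSwap L := by
  induction is generalizing L with
  | nil => rfl
  | cons j t ih => simp [List.foldl_cons, tSwap_cons_succ, ih]

lemma foldl_range_eq_tpass : ∀ (k : Nat) (L : List (Int × Int × Int)), k < L.length →
    (List.range k).foldl tSwap L = tpass k L := by
  intro k
  induction k with
  | zero => intro L _; rfl
  | succ k ih =>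
    intro L hk
    match L, hk with
    | x :: y :: t, hk2 =>
      rw [List.range_succ_eq_map, List.foldl_cons]
      have h0 : tSwap (x :: y :: t) 0 =
          if pvGt x y then y :: x :: t else x :: y :: t := by
        unfold tSwap; split <;> simp_all
      by_cases hxy : pvGt x y = true
      · rw [h0, if_pos hxy]
        show ((List.range k).map (· + 1)).foldl tSwap (y :: x :: t) = _
        rw [foldl_tSwap_shift, ih (x :: t) (by simp only [List.length_cons] at hk2 ⊢; omega)]
        simp [tpass, hxy]
      · rw [h0, if_neg hxy]
        show ((List.range k).map (· + 1)).foldl tSwap (x :: y :: t) = _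
        rw [foldl_tSwap_shift, ih (y :: t) (by simp only [List.length_cons] at hk2 ⊢; omega)]
        simp [tpass, hxy]
    | [x], hk2 => simp at hk2
    | [], hk2 => simp at hk2

lemma tpass_append : ∀ (k : Nat) (P S : List (Int × Int × Int)), P.length = k + 1 →
    tpass k (P ++ S) = tpass k P ++ S := by
  intro k
  induction k with
  | zero => intro P S h; rfl
  | succ k ih =>
    intro P S h
    match P, h with
    | x :: y :: t, h =>
      simp only [List.cons_append, tpass]
      have ht : (x :: t).length = k + 1 := by simp at h ⊢; omega
      have ht' : (y :: t).length = k + 1 := by simp at h ⊢; omega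
      split <;> simp [← ih _ _ ht, ← ih _ _ ht']

lemma tpass_perm : ∀ (k : Nat) (L : List (Int × Int × Int)), (tpass k L).Perm L := by
  intro k
  induction k with
  | zero => intro L; exact List.Perm.refl L
  | succ k ih =>
    intro L
    match L with
    | [] => exact List.Perm.refl _
    | [x] => exact List.Perm.refl _
    | x :: y :: t =>
      simp only [tpass]; split
      · exact ((ih (x :: t)).cons y).trans (List.Perm.swap x y t)
      · exact (ih (y :: t)).cons x

lemma tpass_last : ∀ (k : Nat) (P : List (Int × Int × Int)), P.length = k + 1 →
    ∃ q M, tpass k P = q ++ [M] ∧ ∀ x ∈ P, tle x M := by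
  intro k
  induction k with
  | zero =>
    intro P h
    match P, h with
    | [x], _ => exact ⟨[], x, rfl, by simpa using tle_refl x⟩
  | succ k ih =>
    intro P h
    match P, h with
    | x :: y :: t, h =>
      simp only [tpass]
      by_cases hxy : pvGt x y = true
      · obtain ⟨q, M, hq, hM⟩ := ih (x :: t) (by simp at h ⊢; omega)
        refine ⟨y :: q, M, by simp [hxy, hq], ?_⟩
        intro z hz
        rcases List.mem_cons.1 hz with rfl | hz'
        · exact hM z (List.mem_cons_self)
        rcases List.mem_cons.1 hz' with rfl | hz''
        · exact tle_trans (tle_of_gt hxy) (hM x List.mem_cons_self)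
        · exact hM z (List.mem_cons_of_mem _ hz'')
      · obtain ⟨q, M, hq, hM⟩ := ih (y :: t) (by simp at h ⊢; omega)
        refine ⟨x :: q, M, by simp [hxy, hq], ?_⟩
        intro z hz
        rcases List.mem_cons.1 hz with rfl | hz'
        · exact tle_trans (tle_of_not_gt (by simpa using hxy)) (hM y List.mem_cons_self)
        · exact hM z hz'

-- the outer-loop invariant: after j passes the last j elements are sorted and dominate
def BubbleInv (L0 : List (Int × Int × Int)) (j : Nat) (L : List (Int × Int × Int)) : Prop :=
  L.length = L0.length ∧ (L.drop (L0.length - j)).Pairwise tle ∧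
  (∀ p ∈ L.take (L0.length - j), ∀ s ∈ L.drop (L0.length - j), tle p s) ∧ L.Perm L0

lemma bubble_inv_step (L0 L : List (Int × Int × Int)) (j : Nat) (hj : j < L0.length)
    (h : BubbleInv L0 j L) :
    BubbleInv L0 (j+1) ((List.range (L0.length - j - 1)).foldl tSwap L) := by
  obtain ⟨hlen, hsorted, hdom, hperm⟩ := h
  set n := L0.length with hn
  have hk : n - j - 1 < L.length := by omega
  rw [foldl_range_eq_tpass _ _ hk]
  set k := n - j - 1 with hkdef
  have hsplit : L = L.take (k+1) ++ L.drop (k+1) := (List.take_append_drop _ _).symm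
  have hPlen : (L.take (k+1)).length = k + 1 := by simp; omega
  rw [hsplit, tpass_append _ _ _ hPlen]
  obtain ⟨q, M, hq, hM⟩ := tpass_last _ _ hPlen
  rw [hq]
  have hqperm : (q ++ [M]).Perm (L.take (k+1)) := hq ▸ tpass_perm _ _
  have hqlen : q.length = k := by
    have := hqperm.length_eq; simp at this ⊢; omega
  have hMP : M ∈ L.take (k+1) := hqperm.mem_iff.1 (by simp)
  have htake : n - j = k + 1 := by omega
  have hdrop1 : n - (j+1) = k := by omega
  have hL' : (q ++ [M]) ++ L.drop (k+1) = q ++ (M :: L.drop (k+1)) := by simp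
  rw [hL']
  have hqk : ∀ p ∈ q, p ∈ L.take (k+1) := fun p hp => hqperm.mem_iff.1 (by simp [hp])
  refine ⟨?_, ?_, ?_, ?_⟩
  · simp [hqlen]; omega
  · rw [hdrop1, show (q ++ (M :: L.drop (k+1))).drop k = M :: L.drop (k+1) from by
      rw [← hqlen, List.drop_left]]
    refine List.pairwise_cons.2 ⟨?_, ?_⟩
    · intro s hs; exact hdom M (by rw [htake]; exact hMP) s (by rw [htake]; exact hs)
    · rwa [htake] at hsorted
  · rw [hdrop1, show (q ++ (M :: L.drop (k+1))).drop k = M :: L.drop (k+1) from by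
      rw [← hqlen, List.drop_left],
      show (q ++ (M :: L.drop (k+1))).take k = q from by rw [← hqlen, List.take_left]]
    intro p hp s hs
    have hpP : p ∈ L.take (k+1) := hqk p hp
    rcases List.mem_cons.1 hs with rfl | hs'
    · exact hM p hpP
    · exact hdom p (by rw [htake]; exact hpP) s (by rw [htake]; exact hs')
  · have h1 : (q ++ (M :: L.drop (k+1))).Perm ((q ++ [M]) ++ L.drop (k+1)) := by simp
    exact h1.trans ((hqperm.append_right _).trans
      (by rw [List.take_append_drop]; exact hperm))

lemma bubble_sorts (L0 : List (Int × Int × Int)) :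
    ((List.range L0.length).foldl
      (fun L i => (List.range (L0.length - i - 1)).foldl tSwap L) L0).Pairwise tle ∧
    ((List.range L0.length).foldl
      (fun L i => (List.range (L0.length - i - 1)).foldl tSwap L) L0).Perm L0 := by
  have main : ∀ j ≤ L0.length, BubbleInv L0 j
      ((List.range j).foldl (fun L i => (List.range (L0.length - i - 1)).foldl tSwap L) L0) := by
    intro j
    induction j with
    | zero =>
      intro _
      refine ⟨rfl, by simp, ?_, List.Perm.refl _⟩
      intro p _ s hs; simp at hs
    | succ j ih =>
      intro hj
      rw [List.range_succ, List.foldl_append, List.foldl_cons, List.foldl_nil]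
      exact bubble_inv_step _ _ _ (by omega) (ih (by omega))
  obtain ⟨_, hs, _, hp⟩ := main L0.length (le_refl _)
  exact ⟨by simpa using hs, hp⟩

-- ===== B side: stability of PySem.List.sorted =====

-- the pairwise relation a stable key-sort establishes, refining a previous order R
def SRel {κ : Type} [LinearOrder κ] (key : Int × Int × Int → κ)
    (R : Int × Int × Int → Int × Int × Int → Prop) (x y : Int × Int × Int) : Prop :=
  key x < key y ∨ (key x = key y ∧ R x y)

lemma srel_key_le {κ : Type} [LinearOrder κ] {key : Int × Int × Int → κ}
    {R : Int × Int × Int → Int × Int × Int → Prop} {x y : Int × Int × Int}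
    (h : SRel key R x y) : key x ≤ key y := by
  rcases h with h | ⟨h, _⟩; exact le_of_lt h; exact le_of_eq h

lemma insertBy_pairwise {κ : Type} [LinearOrder κ] (key : Int × Int × Int → κ)
    (R : Int × Int × Int → Int × Int × Int → Prop) (z : Int × Int × Int) :
    ∀ (acc : List (Int × Int × Int)), acc.Pairwise (SRel key R) → (∀ w ∈ acc, R w z) →
    (PySem.List.insertBy (fun a b => decide (key a < key b)) z acc).Pairwise (SRel key R) := by
  intro acc
  induction acc with
  | nil => intro _ _; simp [PySem.List.insertBy]
  | cons y ys ih =>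
    intro hS hR
    rw [PySem.List.insertBy]
    split
    · rename_i hlt
      simp only [decide_eq_true_eq] at hlt
      refine List.pairwise_cons.2 ⟨?_, hS⟩
      intro w hw
      rcases List.mem_cons.1 hw with rfl | hw'
      · exact Or.inl hlt
      · have : key y ≤ key w := srel_key_le ((List.pairwise_cons.1 hS).1 w hw')
        exact Or.inl (lt_of_lt_of_le hlt this)
    · rename_i hnlt
      simp only [decide_eq_true_eq] at hnlt
      refine List.pairwise_cons.2 ⟨?_, ih (List.pairwise_cons.1 hS).2
        (fun w hw => hR w (List.mem_cons_of_mem _ hw))⟩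
      intro w hw
      rcases (PySem.List.mem_insertBy _ _ _ _).1 hw with rfl | hw'
      · rcases lt_or_eq_of_le (le_of_not_gt hnlt) with hlt | heq
        · exact Or.inl hlt
        · exact Or.inr ⟨heq, hR y List.mem_cons_self⟩
      · exact (List.pairwise_cons.1 hS).1 w hw'

lemma sorted_stable {κ : Type} [LinearOrder κ] (key : Int × Int × Int → κ)
    (R : Int × Int × Int → Int × Int × Int → Prop) :
    ∀ (l acc : List (Int × Int × Int)), l.Pairwise R → acc.Pairwise (SRel key R) →
    (∀ w ∈ acc, ∀ x ∈ l, R w x) →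
    (l.foldl (fun acc x => PySem.List.insertBy (fun a b => decide (key a < key b)) x acc) acc).Pairwise (SRel key R) := by
  intro l
  induction l with
  | nil => intro acc _ h _; simpa using h
  | cons x t ih =>
    intro acc hl hacc hcross
    rw [List.foldl_cons]
    have hl' := List.pairwise_cons.1 hl
    refine ih _ hl'.2 (insertBy_pairwise key R x acc hacc
      (fun w hw => hcross w hw x List.mem_cons_self)) ?_
    intro w hw y hy
    rcases (PySem.List.mem_insertBy _ _ _ _).1 hw with rfl | hw'
    · exact hl'.1 y hy
    · exact hcross w hw' y (List.mem_cons_of_mem _ hy)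

lemma sorted_pairwise_stable {κ : Type} [LinearOrder κ] (key : Int × Int × Int → κ)
    (R : Int × Int × Int → Int × Int × Int → Prop) (l : List (Int × Int × Int))
    (hl : l.Pairwise R) :
    (PySem.List.sorted l key false).Pairwise (SRel key R) := by
  rw [PySem.List.sorted_eq_foldl_insertBy]
  exact sorted_stable key R l [] hl (by simp) (by simp)

-- SRel nested twice is exactly tle
lemma srel_imp_tle (x y : Int × Int × Int)
    (h : SRel (fun t => t.1) (SRel (fun t => t.2.1) (fun u v => u.2.2 ≤ v.2.2)) x y) : tle x y := by
  obtain ⟨a1, m1, d1⟩ := x; obtain ⟨a2, m2, d2⟩ := y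
  simp [SRel, tle] at *; omega

-- the A-side state (dias, meses, años) corresponds to a triple list plus the untouched tails
def RelState (n : Nat) (tm ta : List Int) (st : List Int × List Int × List Int)
    (L : List (Int × Int × Int)) : Prop :=
  L.length = n ∧ st.1 = L.map (fun t => t.2.2) ∧
  st.2.1 = L.map (fun t => t.2.1) ++ tm ∧ st.2.2 = L.map (fun t => t.1) ++ ta

lemma getD_map_append (L : List (Int × Int × Int)) (f : Int × Int × Int → Int)
    (tail : List Int) (i : Nat) (hi : i < L.length) :
    (L.map f ++ tail).getD i 0 = f (L.getD i (0,0,0)) := by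
  rw [List.getD_eq_getElem _ _ (by simp; omega), List.getD_eq_getElem _ _ hi,
    List.getElem_append_left (by simpa using hi), List.getElem_map]

lemma getD_map' (L : List (Int × Int × Int)) (f : Int × Int × Int → Int) (i : Nat)
    (hi : i < L.length) : (L.map f).getD i 0 = f (L.getD i (0,0,0)) := by
  rw [List.getD_eq_getElem _ _ (by simpa using hi), List.getD_eq_getElem _ _ hi, List.getElem_map]

lemma rel_step (n : Nat) (tm ta : List Int) (st : List Int × List Int × List Int)
    (L : List (Int × Int × Int)) (j : Nat) (hj : j + 1 < L.length)
    (h : RelState n tm ta st L) : RelState n tm ta (pvSwapStep st j) (tSwap L j) := by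
  obtain ⟨hL, hd, hm, ha⟩ := h
  have hj' : j < L.length := by omega
  have hcond : pvGt (st.2.2.getD j 0, st.2.1.getD j 0, st.1.getD j 0)
      (st.2.2.getD (j+1) 0, st.2.1.getD (j+1) 0, st.1.getD (j+1) 0)
      = pvGt (L.getD j (0,0,0)) (L.getD (j+1) (0,0,0)) := by
    rw [hd, hm, ha, getD_map_append _ _ _ _ hj', getD_map_append _ _ _ _ hj,
      getD_map_append _ _ _ _ hj', getD_map_append _ _ _ _ hj,
      getD_map' _ _ _ hj', getD_map' _ _ _ hj]
  unfold pvSwapStep tSwap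
  simp only [hcond]
  split
  · refine ⟨by simp [hL], ?_, ?_, ?_⟩
    · rw [hd, getD_map' _ _ _ hj', getD_map' _ _ _ hj, ← List.map_set, ← List.map_set]
    · rw [hm, getD_map_append _ _ _ _ hj', getD_map_append _ _ _ _ hj,
        List.set_append_left _ _ (by simpa using hj'), List.set_append_left _ _ (by simpa using hj),
        ← List.map_set, ← List.map_set]
    · rw [ha, getD_map_append _ _ _ _ hj', getD_map_append _ _ _ _ hj,
        List.set_append_left _ _ (by simpa using hj'), List.set_append_left _ _ (by simpa using hj),
        ← List.map_set, ← List.map_set]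
  · exact ⟨hL, hd, hm, ha⟩

lemma rel_fold (n : Nat) (tm ta : List Int) (is : List Nat) :
    ∀ (st : List Int × List Int × List Int) (L : List (Int × Int × Int)),
    (∀ j ∈ is, j + 1 < n) → RelState n tm ta st L →
    RelState n tm ta (is.foldl pvSwapStep st) (is.foldl tSwap L) := by
  induction is with
  | nil => intro st L _ h; exact h
  | cons j t ih =>
    intro st L hb h
    rw [List.foldl_cons, List.foldl_cons]
    exact ih _ _ (fun j' hj' => hb j' (List.mem_cons_of_mem _ hj'))
      (rel_step n tm ta st L j (h.1 ▸ hb j List.mem_cons_self) h)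

lemma rel_outer (n : Nat) (tm ta : List Int) (is : List Nat) :
    ∀ (st : List Int × List Int × List Int) (L : List (Int × Int × Int)),
    RelState n tm ta st L →
    RelState n tm ta
      (is.foldl (fun st i => (List.range (n - i - 1)).foldl pvSwapStep st) st)
      (is.foldl (fun L i => (List.range (n - i - 1)).foldl tSwap L) L) := by
  induction is with
  | nil => intro st L h; exact h
  | cons i t ih =>
    intro st L h
    rw [List.foldl_cons, List.foldl_cons]
    exact ih _ _ (rel_fold n tm ta _ st L
      (fun j hj => by simp only [List.mem_range] at hj; omega) h)

lemma rel_init (dias meses a_os : List Int)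
    (hm : dias.length ≤ meses.length) (ha : dias.length ≤ a_os.length) :
    RelState dias.length (meses.drop dias.length) (a_os.drop dias.length) (dias, meses, a_os)
      ((List.range dias.length).map (fun i => (a_os.getD i 0, meses.getD i 0, dias.getD i 0))) := by
  set n := dias.length with hn
  refine ⟨by simp [hn], ?_, ?_, ?_⟩
  · apply List.ext_getElem (by simp [hn])
    intro i h1 h2
    simp only [List.getElem_map, List.getElem_range]
    exact (List.getD_eq_getElem _ _ h1).symm
  · apply List.ext_getElem (by simp [hn]; omega)
    intro i h1 h2
    by_cases hin : i < n
    · rw [List.getElem_append_left (by simpa using hin)]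
      simp only [List.getElem_map, List.getElem_range]
      exact (List.getD_eq_getElem _ _ (by omega)).symm
    · rw [List.getElem_append_right (by simp; omega)]
      simp only [List.length_map, List.length_range, List.getElem_drop]
      congr 1; omega
  · apply List.ext_getElem (by simp [hn]; omega)
    intro i h1 h2
    by_cases hin : i < n
    · rw [List.getElem_append_left (by simpa using hin)]
      simp only [List.getElem_map, List.getElem_range]
      exact (List.getD_eq_getElem _ _ (by omega)).symm
    · rw [List.getElem_append_right (by simp; omega)]
      simp only [List.length_map, List.length_range, List.getElem_drop]
      congr 1; omega

-- the triple list B sorts, with its order facts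
lemma ts3_facts (ts0 : List (Int × Int × Int)) :
    (PySem.List.sorted (PySem.List.sorted (PySem.List.sorted ts0 (fun t => t.2.2) false)
        (fun t => t.2.1) false) (fun t => t.1) false).Pairwise tle ∧
    (PySem.List.sorted (PySem.List.sorted (PySem.List.sorted ts0 (fun t => t.2.2) false)
        (fun t => t.2.1) false) (fun t => t.1) false).Perm ts0 := by
  constructor
  · have h1 := PySem.List.sorted_pairwise ts0 (fun t => t.2.2)
    have h2 := sorted_pairwise_stable (fun t => t.2.1) (fun u v => u.2.2 ≤ v.2.2) _ h1
    have h3 := sorted_pairwise_stable (fun t => t.1)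
      (SRel (fun t => t.2.1) (fun u v => u.2.2 ≤ v.2.2)) _ h2
    exact h3.imp (fun h => srel_imp_tle _ _ h)
  · exact (PySem.List.sorted_perm _ _ _).trans
      ((PySem.List.sorted_perm _ _ _).trans (PySem.List.sorted_perm _ _ _))

-- ===== VERDICT (by name: the statement is the Claim_ definition above) =====
theorem ordenar_fechas_spec : Claim_equal_ordenar_fechas := by
  intro dias meses a_os _ hpre
  unfold Spec_ordenar_fechas ordenar_fechas ordenar_fechas_alt
  by_cases hn : 1 < dias.length
  · rw [if_pos hn]
    have hlen : dias.length ≤ meses.length ∧ dias.length ≤ a_os.length := by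
      rcases hpre with h | h
      · omega
      · exact h
    set n := dias.length with hndef
    set ts0 := (List.range n).map (fun i => (a_os.getD i 0, meses.getD i 0, dias.getD i 0)) with hts0
    have hts0len : ts0.length = n := by simp [hts0]
    have hrel := rel_outer n (meses.drop n) (a_os.drop n) (List.range n) (dias, meses, a_os) ts0
      (rel_init dias meses a_os hlen.1 hlen.2)
    set Lf := (List.range n).foldl (fun L i => (List.range (n - i - 1)).foldl tSwap L) ts0 with hLf
    have hbub := bubble_sorts ts0
    rw [hts0len] at hbub
    obtain ⟨hsort, hperm⟩ := hbub
    obtain ⟨h3sort, h3perm⟩ := ts3_facts ts0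
    have heq : Lf = PySem.List.sorted (PySem.List.sorted (PySem.List.sorted ts0
        (fun t => t.2.2) false) (fun t => t.2.1) false) (fun t => t.1) false := by
      exact List.Perm.eq_of_pairwise (fun a b _ _ h1 h2 => tle_antisymm h1 h2)
        hsort h3sort (hperm.trans h3perm.symm)
    obtain ⟨_, hd, hm, ha⟩ := hrel
    rw [heq] at hd hm ha
    exact Prod.ext hd (Prod.ext hm ha)
  · rw [if_neg hn]
    have : dias.length = 0 ∨ dias.length = 1 := by omega
    rcases this with h | h
    · simp [h]
    · simp [h, List.range_succ]
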